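-- pv_equiv track=rewrite | github.com/huikinglam02gmail/Leetcode_solutions | 3752.lexicographically-smallest-negated-permutation-that-sums-to-target.py | lexSmallestNegatedPerm
-- ===== SOURCE A (Python) =====
-- from typing import List
--
-- def lexSmallestNegatedPerm(n: int, target: int) -> List[int]:
--     S = n * (n + 1) // 2
--     if target < -S or target > S or (S - target) % 2: return []
--     D = S - target
--     result = [i for i in range(1, n + 1)]
--     j = n - 1
--     while D > 0 and j >= 0:
--         if D >= 2 * (j + 1):
--             result[j] = - (j + 1)
--             D -= 2 * (j + 1)
--         j -= 1
--     return sorted(result)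
-- ===== SOURCE B (Python) =====
-- def lexSmallestNegatedPerm(n: int, target: int):
--     # Build the sorted answer directly in O(n): greedily peel the largest
--     # remaining values off the needed negation budget, then emit
--     # negatives ascending followed by positives ascending -- no sort.
--     S = n * (n + 1) // 2
--     if target < -S or target > S or (S - target) % 2:
--         return []
--     rem, v = (S - target) // 2, n
--     while v > 0 and rem >= v:
--         rem -= v
--         v -= 1
--     out = list(range(-n, -v))            # -n, -(n-1), ..., -(v+1)
--     if 0 < rem <= v:                     # leftover must be an available value
--         out.append(-rem)
--     out.extend(i for i in range(1, v + 1) if i != rem)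
--     return out
-- ===== Notes on version B (the rewrite author's own statement) =====
-- stated objective: faster
-- what changed: Instead of scanning j=n-1..0 mutating the list and then calling sorted(), B runs the greedy peel as a simple (rem,v) arithmetic loop and emits the already-sorted answer directly (negatives ascending, leftover, positives ascending), removing the final sort.
import Mathlib
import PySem

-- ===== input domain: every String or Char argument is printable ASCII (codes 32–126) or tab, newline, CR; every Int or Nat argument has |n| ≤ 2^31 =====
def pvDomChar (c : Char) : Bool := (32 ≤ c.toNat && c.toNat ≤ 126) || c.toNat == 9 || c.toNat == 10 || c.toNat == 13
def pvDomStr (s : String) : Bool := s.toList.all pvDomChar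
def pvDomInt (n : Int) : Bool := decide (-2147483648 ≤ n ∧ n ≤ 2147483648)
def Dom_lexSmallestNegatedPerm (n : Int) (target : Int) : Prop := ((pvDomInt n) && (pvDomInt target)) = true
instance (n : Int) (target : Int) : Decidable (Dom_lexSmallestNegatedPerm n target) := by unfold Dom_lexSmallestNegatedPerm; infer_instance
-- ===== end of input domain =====

-- B builds the sorted answer directly (negatives ascending, leftover, positives ascending)
-- instead of A's scan-and-mutate followed by sorted(): same return value, no sort.

-- ===== PORT A =====
-- the while loop of A; the counter m is j + 1 (the loop runs while j >= 0, i.e. m >= 1);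
-- res.set m is exact for result[j] = ...: inside the loop 0 <= j < len(result) always holds
def lexA_loop (res : List Int) (D : Int) : Nat → List Int
  | 0 => res
  | m + 1 =>
    if D > 0 then
      if D ≥ 2 * ((m : Int) + 1) then
        lexA_loop (res.set m (-((m : Int) + 1))) (D - 2 * ((m : Int) + 1)) m
      else lexA_loop res D m
    else res

def lexSmallestNegatedPerm (n : Int) (target : Int) : List Int :=
  let S := PySem.Int.floordiv (n * (n + 1)) 2
  if target < -S ∨ target > S ∨ PySem.Int.mod (S - target) 2 ≠ 0 then []
  else
    let D := S - target
    let result := PySem.List.pyRange 1 (n + 1) 1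
    -- j starts at n - 1, i.e. m = j + 1 starts at n (0 when n ≤ 0: the loop body never runs)
    PySem.List.sorted (lexA_loop result D n.toNat) (fun x => x) false

-- ===== PORT B =====
-- the while loop of B: while v > 0 and rem >= v: rem -= v; v -= 1
def lexB_loop (rem : Int) (v : Int) : Int × Int :=
  if h : 0 < v ∧ v ≤ rem then lexB_loop (rem - v) (v - 1) else (rem, v)
termination_by v.toNat
decreasing_by omega

def lexSmallestNegatedPerm_alt (n : Int) (target : Int) : List Int :=
  let S := PySem.Int.floordiv (n * (n + 1)) 2
  if target < -S ∨ target > S ∨ PySem.Int.mod (S - target) 2 ≠ 0 then []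
  else
    let p := lexB_loop (PySem.Int.floordiv (S - target) 2) n
    let rem := p.1
    let v := p.2
    let out := PySem.List.pyRange (-n) (-v) 1
    let out := if 0 < rem ∧ rem ≤ v then out ++ [-rem] else out
    out ++ (PySem.List.pyRange 1 (v + 1) 1).filter (fun i => decide (i ≠ rem))

-- ===== PRECONDITION & SPEC =====
def Spec_lexSmallestNegatedPerm (n : Int) (target : Int) (out : List Int) : Prop := out = lexSmallestNegatedPerm_alt n target
instance (n : Int) (target : Int) (out : List Int) : Decidable (Spec_lexSmallestNegatedPerm n target out) := by unfold Spec_lexSmallestNegatedPerm; infer_instance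

-- ===== CLAIM (what is proved, stated in full; the proofs are below) =====
def Claim_equal_lexSmallestNegatedPerm : Prop := ∀ (n : Int) (target : Int), Dom_lexSmallestNegatedPerm n target → Spec_lexSmallestNegatedPerm n target (lexSmallestNegatedPerm n target)

-- ===== LEMMAS AND PROOFS =====

theorem lexA_loop_zero (res : List Int) (m : Nat) : lexA_loop res 0 m = res := by
  cases m <;> simp [lexA_loop]

theorem lexA_fin (m : Nat) (res : List Int) (D : Int) (h1 : 0 < D) (h2 : 2 ∣ D)
    (h3 : D ≤ 2 * m) : lexA_loop res D m = res.set (D / 2 - 1).toNat (-(D / 2)) := by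
  induction m generalizing res with
  | zero => omega
  | succ m ih =>
    simp only [lexA_loop, h1, if_true, ge_iff_le]
    push_cast
    split
    · -- D ≥ 2*(m+1): then D = 2*(m+1)
      have hD : D = 2 * ((m : Int) + 1) := by omega
      rw [show D - 2 * ((m : Int) + 1) = 0 by omega, lexA_loop_zero]
      have : D / 2 = (m : Int) + 1 := by omega
      rw [this]
      simp
    · have hle : D ≤ 2 * m := by omega
      exact ih res hle

theorem lexB_inv (rem v : Int) (h0 : 0 ≤ rem) (hv : 0 ≤ v) (h2 : 2 * rem ≤ v * (v + 1)) :
    0 ≤ (lexB_loop rem v).1 ∧ 0 ≤ (lexB_loop rem v).2 ∧ (lexB_loop rem v).2 ≤ v ∧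
      ((lexB_loop rem v).1 = 0 ∨ (lexB_loop rem v).1 < (lexB_loop rem v).2) := by
  fun_induction lexB_loop rem v with
  | case1 rem v h ih =>
    have := ih (by omega) (by omega) (by nlinarith)
    omega
  | case2 rem v h =>
    simp only
    constructor
    · omega
    constructor
    · omega
    constructor
    · omega
    · by_cases hvz : v ≤ 0
      · left; nlinarith
      · omega
def negTail (res : List Int) (v : Nat) : Nat → List Int
  | 0 => res
  | m + 1 => if v ≤ m then negTail (res.set m (-((m : Int) + 1))) v m else res
theorem length_negTail (res : List Int) (v m : Nat) : (negTail res v m).length = res.length := by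
  induction m generalizing res with
  | zero => rfl
  | succ m ih => simp only [negTail]; split <;> simp [ih]

theorem getElem_negTail (res : List Int) (v m i : Nat) (h : i < res.length)
    (h' : i < (negTail res v m).length) :
    (negTail res v m)[i] = if v ≤ i ∧ i < m then -((i : Int) + 1) else res[i] := by
  induction m generalizing res with
  | zero => simp [negTail]
  | succ m ih =>
    simp only [negTail]
    split
    · rename_i hvm
      rw [ih (res.set m (-((m : Int) + 1))) (by simpa using h) (by rw [length_negTail]; simpa using h)]
      simp only [List.getElem_set]
      split_ifs <;> first | rfl | omega
    · rename_i hvm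
      have hni : ¬(v ≤ i ∧ i < m + 1) := by omega
      simp only [if_neg hni]

theorem lexA_char (m : Nat) (res : List Int) (D : Int) (h0 : 0 ≤ D) (h2 : 2 ∣ D)
    (h3 : D ≤ (m : Int) * ((m : Int) + 1)) :
    lexA_loop res D m =
      (fun p : Int × Int =>
        if 0 < p.1 then (negTail res p.2.toNat m).set (p.1 - 1).toNat (-p.1)
        else negTail res p.2.toNat m) (lexB_loop (D / 2) (m : Int)) := by
  induction m generalizing res D with
  | zero =>
    have hD : D = 0 := by simp at h3; omega
    subst hD
    have hB : lexB_loop (0 / 2) ((0 : Nat) : Int) = (0, 0) := by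
      rw [lexB_loop, dif_neg (by omega)]
      norm_num
    rw [hB]
    simp [lexA_loop, negTail]
  | succ m ih =>
    obtain ⟨k, rfl⟩ := h2
    have hdiv : 2 * k / 2 = k := Int.mul_ediv_cancel_left k (by norm_num)
    by_cases hpos : 0 < 2 * k
    · by_cases hge : 2 * k ≥ 2 * ((m : Int) + 1)
      · -- take branch
        have hrec : lexA_loop res (2 * k) (m + 1) =
            lexA_loop (res.set m (-((m : Int) + 1))) (2 * k - 2 * ((m : Int) + 1)) m := by
          simp only [lexA_loop, hpos, if_true]
          rw [if_pos (by push_cast; omega)]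
        rw [hrec]
        have hexp : ((m : Int) + 1) * ((m : Int) + 1 + 1) = (m : Int) * ((m : Int) + 1) + 2 * ((m : Int) + 1) := by ring
        have h3' : 2 * k - 2 * ((m : Int) + 1) ≤ (m : Int) * ((m : Int) + 1) := by
          push_cast at h3; omega
        have heq : 2 * k - 2 * ((m : Int) + 1) = 2 * (k - ((m : Int) + 1)) := by ring
        rw [heq] at hrec h3' ⊢
        rw [ih _ _ (by omega) ⟨_, rfl⟩ h3']
        have hdiv' : 2 * (k - ((m : Int) + 1)) / 2 = k - ((m : Int) + 1) :=
          Int.mul_ediv_cancel_left _ (by norm_num)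
        rw [hdiv, hdiv']
        -- B's loop takes the same step
        have hB : lexB_loop k ((m : Nat) + 1 : Int) = lexB_loop (k - ((m : Int) + 1)) (m : Int) := by
          rw [lexB_loop]
          rw [dif_pos (by constructor <;> push_cast <;> omega)]
          norm_num
        push_cast
        rw [hB]
        -- invariants of the recursive call
        have hinv := lexB_inv (k - ((m : Int) + 1)) (m : Int) (by omega) (by positivity) (by omega)
        set p := lexB_loop (k - ((m : Int) + 1)) (m : Int) with hp
        have hguard : p.2.toNat ≤ m := by omega
        simp only [negTail, show ((m : Nat) + 1 : Nat) = m + 1 from rfl]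
        rw [if_pos hguard]
      · -- skip/finish branch: 2k < 2(m+1)
        have hk1 : 0 < k := by omega
        have hkm : k ≤ (m : Int) := by omega
        rw [lexA_fin (m + 1) res (2 * k) hpos ⟨_, rfl⟩ (by push_cast; omega), hdiv]
        have hB : lexB_loop k ((m : Nat) + 1 : Int) = (k, ((m : Int) + 1)) := by
          rw [lexB_loop, dif_neg (by push_cast; omega)]
        push_cast
        rw [hB]
        simp only [hk1, if_pos]
        have : (((m : Int) + 1)).toNat = m + 1 := by omega
        rw [this]
        simp only [negTail]
        rw [if_neg (by omega)]
    · have hD : 2 * k = 0 := by omega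
      rw [hD]
      rw [lexA_loop_zero]
      have hB : lexB_loop 0 ((m : Nat) + 1 : Int) = (0, ((m : Int) + 1)) := by
        rw [lexB_loop, dif_neg (by push_cast; omega)]
      norm_num
      push_cast
      rw [hB]
      simp only
      rw [if_neg (by omega)]
      have : (((m : Int) + 1)).toNat = m + 1 := by omega
      rw [this]
      simp only [negTail]
      rw [if_neg (by omega)]

theorem negTail_pyRange (N v : Nat) (hv : v ≤ N) :
    negTail (PySem.List.pyRange 1 ((N : Int) + 1) 1) v N =
      PySem.List.pyRange 1 ((v : Int) + 1) 1 ++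
        (PySem.List.pyRange ((v : Int) + 1) ((N : Int) + 1) 1).map (fun x => -x) := by
  apply List.ext_getElem
  · simp [length_negTail, PySem.List.length_pyRange_one] <;> omega
  · intro i h1 h2
    have hlen : (PySem.List.pyRange 1 ((N : Int) + 1) 1).length = N := by
      simp [PySem.List.length_pyRange_one]
    have hiN : i < N := by rwa [length_negTail, hlen] at h1
    rw [getElem_negTail _ _ _ _ (by omega) (by rw [length_negTail]; omega)]
    have hl1 : (PySem.List.pyRange 1 ((v : Int) + 1) 1).length = v := by
      simp [PySem.List.length_pyRange_one]
    by_cases hiv : i < v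
    · rw [List.getElem_append_left (by omega)]
      rw [PySem.List.getElem_pyRange_one]
      rw [if_neg (by omega), PySem.List.getElem_pyRange_one]
    · rw [List.getElem_append_right (by omega)]
      rw [if_pos (by omega)]
      simp only [List.getElem_map, PySem.List.getElem_pyRange_one, hl1]
      omega

theorem pyRange_neg_reverse (a b : Int) (h : a ≤ b) :
    PySem.List.pyRange (-b) (-a) 1 =
      ((PySem.List.pyRange (a + 1) (b + 1) 1).map (fun x => -x)).reverse := by
  apply List.ext_getElem
  · simp [PySem.List.length_pyRange_one]; omega
  · intro i h1 h2
    have hlen : (-a - -b).toNat = (b - a).toNat := by omega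
    rw [PySem.List.getElem_pyRange_one, List.getElem_reverse]
    simp only [List.getElem_map, PySem.List.getElem_pyRange_one]
    simp only [List.length_map, PySem.List.length_pyRange_one] at h1 h2 ⊢
    omega

theorem filter_pyRange_ne_of_notmem (a b r : Int) (hr : r < a ∨ b ≤ r) :
    (PySem.List.pyRange a b 1).filter (fun i => decide (i ≠ r)) = PySem.List.pyRange a b 1 := by
  apply List.filter_eq_self.2
  intro x hx
  rw [PySem.List.mem_pyRange_one] at hx
  simp; omega

theorem filter_pyRange_ne (v r : Int) (h1 : 0 < r) (h2 : r ≤ v) :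
    (PySem.List.pyRange 1 (v + 1) 1).filter (fun i => decide (i ≠ r)) =
      PySem.List.pyRange 1 r 1 ++ PySem.List.pyRange (r + 1) (v + 1) 1 := by
  rw [PySem.List.pyRange_one_append 1 (r + 1) (v + 1) (by omega) (by omega),
      PySem.List.pyRange_one_succ_right (by omega : (1:Int) ≤ r)]
  rw [List.filter_append, List.filter_append]
  rw [filter_pyRange_ne_of_notmem 1 r r (by omega),
      filter_pyRange_ne_of_notmem (r + 1) (v + 1) r (by omega)]
  simp

theorem pairwise_lt_block0 (nn v : Int) (h1 : 0 ≤ v) (h2 : v ≤ nn) :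
    (PySem.List.pyRange (-nn) (-v) 1 ++ PySem.List.pyRange 1 (v + 1) 1).Pairwise (· < ·) := by
  rw [List.pairwise_append]
  refine ⟨PySem.List.pairwise_lt_pyRange_one _ _, PySem.List.pairwise_lt_pyRange_one _ _, ?_⟩
  intro a ha b hb
  rw [PySem.List.mem_pyRange_one] at ha hb
  omega

theorem sorted_block0 (nn v : Int) (h1 : 0 ≤ v) (h2 : v ≤ nn) :
    PySem.List.sorted
      (PySem.List.pyRange 1 (v + 1) 1 ++
        (PySem.List.pyRange (v + 1) (nn + 1) 1).map (fun x => -x)) (fun x => x) false =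
      PySem.List.pyRange (-nn) (-v) 1 ++ PySem.List.pyRange 1 (v + 1) 1 := by
  apply PySem.List.sorted_eq_of_perm_of_pairwise_lt
  · rw [pyRange_neg_reverse v nn h2]
    exact ((List.reverse_perm _).append_right _).trans List.perm_append_comm
  · simpa using pairwise_lt_block0 nn v h1 h2

theorem pairwise_lt_block1 (nn v r : Int) (h0 : 0 < r) (h1 : r < v) (h2 : v ≤ nn) :
    ((PySem.List.pyRange (-nn) (-v) 1 ++ [-r]) ++
      (PySem.List.pyRange 1 r 1 ++ PySem.List.pyRange (r + 1) (v + 1) 1)).Pairwise (· < ·) := by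
  simp only [List.pairwise_append, List.pairwise_cons, List.mem_append,
    List.mem_singleton, PySem.List.mem_pyRange_one, List.not_mem_nil]
  exact ⟨⟨PySem.List.pairwise_lt_pyRange_one _ _, ⟨fun b hb => hb.elim, List.Pairwise.nil⟩,
      fun a ha b hb => by omega⟩,
    ⟨PySem.List.pairwise_lt_pyRange_one _ _, PySem.List.pairwise_lt_pyRange_one _ _,
      fun a ha b hb => by omega⟩,
    fun a ha b hb => by omega⟩

theorem set_block1 (nn v r : Int) (h0 : 0 < r) (h1 : r < v) (h2 : v ≤ nn) :
    (PySem.List.pyRange 1 (v + 1) 1 ++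
        (PySem.List.pyRange (v + 1) (nn + 1) 1).map (fun x => -x)).set (r - 1).toNat (-r) =
      ((PySem.List.pyRange 1 r 1 ++ [-r]) ++ PySem.List.pyRange (r + 1) (v + 1) 1) ++
        (PySem.List.pyRange (v + 1) (nn + 1) 1).map (fun x => -x) := by
  have hsplit : PySem.List.pyRange 1 (v + 1) 1 =
      (PySem.List.pyRange 1 r 1 ++ [r]) ++ PySem.List.pyRange (r + 1) (v + 1) 1 := by
    rw [PySem.List.pyRange_one_append 1 (r + 1) (v + 1) (by omega) (by omega),
        PySem.List.pyRange_one_succ_right (by omega : (1:Int) ≤ r)]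
  rw [hsplit]
  have hlX : (PySem.List.pyRange 1 r 1).length = (r - 1).toNat := by
    simp [PySem.List.length_pyRange_one]
  rw [List.set_append, if_pos (by simp [hlX, PySem.List.length_pyRange_one] <;> omega)]
  rw [List.set_append, if_pos (by simp [hlX] <;> omega)]
  rw [List.set_append, if_neg (by omega)]
  rw [hlX]
  simp

theorem sorted_block1 (nn v r : Int) (h0 : 0 < r) (h1 : r < v) (h2 : v ≤ nn) :
    PySem.List.sorted
      ((PySem.List.pyRange 1 (v + 1) 1 ++
          (PySem.List.pyRange (v + 1) (nn + 1) 1).map (fun x => -x)).set (r - 1).toNat (-r))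
      (fun x => x) false =
      (PySem.List.pyRange (-nn) (-v) 1 ++ [-r]) ++
        (PySem.List.pyRange 1 r 1 ++ PySem.List.pyRange (r + 1) (v + 1) 1) := by
  rw [set_block1 nn v r h0 h1 h2]
  apply PySem.List.sorted_eq_of_perm_of_pairwise_lt
  · rw [← Multiset.coe_eq_coe]
    rw [pyRange_neg_reverse v nn h2]
    simp only [← Multiset.coe_add, Multiset.coe_reverse]  -- hope: coe of ++ is +
    abel
  · simpa using pairwise_lt_block1 nn v r h0 h1 h2

theorem main_eq (n target : Int) : lexSmallestNegatedPerm n target = lexSmallestNegatedPerm_alt n target := by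
  unfold lexSmallestNegatedPerm lexSmallestNegatedPerm_alt
  dsimp only
  set S := PySem.Int.floordiv (n * (n + 1)) 2 with hSdef
  by_cases hc : target < -S ∨ target > S ∨ PySem.Int.mod (S - target) 2 ≠ 0
  · rw [if_pos hc, if_pos hc]
  · rw [if_neg hc, if_neg hc]
    push_neg at hc
    obtain ⟨h1, h2', h3⟩ := hc
    have hSd : S = n * (n + 1) / 2 := by
      rw [hSdef, PySem.Int.floordiv_eq_ediv_of_pos (by norm_num)]
    have hev : (2 : Int) ∣ n * (n + 1) := (Int.even_mul_succ_self n).two_dvd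
    have hS2 : 2 * S = n * (n + 1) := by rw [hSd]; exact Int.mul_ediv_cancel' hev
    have hdvd : (2 : Int) ∣ (S - target) := by
      rwa [PySem.Int.mod_eq_zero_iff_dvd] at h3
    obtain ⟨k, hkeq⟩ := hdvd
    have hfd : PySem.Int.floordiv (S - target) 2 = k := by
      rw [PySem.Int.floordiv_eq_ediv_of_pos (by norm_num), hkeq]
      exact Int.mul_ediv_cancel_left _ (by norm_num)
    rw [hfd]
    by_cases hn : n ≤ 0
    · have hB : lexB_loop k n = (k, n) := by rw [lexB_loop, dif_neg (by omega)]
      have hnil1 : PySem.List.pyRange 1 (n + 1) 1 = [] :=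
        PySem.List.pyRange_one_eq_nil (by omega)
      have hnt : n.toNat = 0 := by omega
      rw [hB, hnil1, hnt]
      dsimp only
      rw [if_neg (by omega)]
      rw [PySem.List.pyRange_one_eq_nil (le_refl (-n))]
      simp [lexA_loop, PySem.List.sorted]
    · push_neg at hn
      have hNn : ((n.toNat : Nat) : Int) = n := by omega
      have hk2 : 2 * k = S - target := hkeq.symm
      have hchar := lexA_char n.toNat (PySem.List.pyRange 1 (n + 1) 1) (S - target)
        (by omega) ⟨k, hkeq⟩
        (by rw [show ((n.toNat : Nat) : Int) * (((n.toNat : Nat) : Int) + 1) = n * (n + 1) by rw [hNn], ← hS2]; omega)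
      have hed : (S - target) / 2 = k := by
        rw [hkeq]; exact Int.mul_ediv_cancel_left _ (by norm_num)
      rw [hed, hNn] at hchar
      rw [hchar]
      have hinv := lexB_inv k n (by omega) (by omega) (by rw [← hS2]; omega)
      set p := lexB_loop k n with hp
      obtain ⟨hr0, hv0, hvn, hrv⟩ := hinv
      have hvcast : ((p.2.toNat : Nat) : Int) = p.2 := by omega
      have hneg := negTail_pyRange n.toNat p.2.toNat (by omega)
      rw [hNn, hvcast] at hneg
      dsimp only
      by_cases hr : 0 < p.1
      · rw [if_pos hr, hneg, sorted_block1 n p.2 p.1 hr (by omega) (by omega)]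
        rw [if_pos ⟨hr, by omega⟩]
        rw [filter_pyRange_ne p.2 p.1 hr (by omega)]
      · rw [if_neg hr, hneg, sorted_block0 n p.2 (by omega) (by omega)]
        rw [if_neg (by omega)]
        rw [show p.1 = 0 by omega]
        rw [filter_pyRange_ne_of_notmem 1 (p.2 + 1) 0 (by omega)]

-- ===== VERDICT (by name: the statement is the Claim_ definition above) =====
theorem lexSmallestNegatedPerm_spec : Claim_equal_lexSmallestNegatedPerm := by
  intro n target _
  unfold Spec_lexSmallestNegatedPerm
  exact main_eq n target
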